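-- pv_equiv track=rewrite | github.com/taylorjohn/NEMO-WM | core/arc_dsa_patterns.py | sliding_window_1d
-- ===== SOURCE A (Python) =====
-- from collections import defaultdict, Counter
--
-- def sliding_window_1d(arr, window_size, op='sum'):
--     """Apply sliding window operation on 1D array."""
--     results = []
--     for i in range(len(arr) - window_size + 1):
--         window = arr[i:i + window_size]
--         if op == 'sum':
--             results.append(sum(window))
--         elif op == 'max':
--             results.append(max(window))
--         elif op == 'min':
--             results.append(min(window))
--         elif op == 'majority':
--             results.append(Counter(window).most_common(1)[0][0])
--     return results
-- ===== SOURCE B (Python) =====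
-- def sliding_window_1d(arr, window_size, op='sum'):
--     """Apply sliding window operation on 1D array (incremental single-pass version)."""
--     n = len(arr)
--     if window_size < 1 or n < window_size:
--         return []
--     if op == 'sum':
--         acc = sum(arr[:window_size])
--         out = [acc]
--         for i in range(window_size, n):
--             acc += arr[i] - arr[i - window_size]
--             out.append(acc)
--         return out
--     if op == 'max' or op == 'min':
--         is_max = (op == 'max')
--         cur = max(arr[:window_size]) if is_max else min(arr[:window_size])
--         out = [cur]
--         for i in range(1, n - window_size + 1):
--             entering = arr[i + window_size - 1]
--             if arr[i - 1] == cur: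
--                 win = arr[i:i + window_size]
--                 cur = max(win) if is_max else min(win)
--             else:
--                 cur = max(cur, entering) if is_max else min(cur, entering)
--             out.append(cur)
--         return out
--     if op == 'majority':
--         out = []
--         for i in range(n - window_size + 1):
--             counts = {}
--             for j in range(i, i + window_size):
--                 x = arr[j]
--                 counts[x] = counts.get(x, 0) + 1
--             best = max(counts.values())
--             for j in range(i, i + window_size):
--                 if counts[arr[j]] == best:
--                     out.append(arr[j])
--                     break
--         return out
--     return []
-- ===== Notes on version B (the rewrite author's own statement) =====
-- stated objective: faster
-- what changed: B replaces A's slice-and-recompute per window with incremental single-pass updates: a running sum for 'sum', an O(1) extremum update that rescans only when the leaving element was the extremum for 'max'/'min', and for 'majority' a per-window count dict plus a first-match scan instead of Counter plus most_common's sort.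
-- outside the precondition, e.g. on sliding_window_1d([1, 2], 0, 'sum'): A returns [0, 0, 0], B returns []; on sliding_window_1d([1, 2, 3], -1, 'sum'): A returns [3, 0, 0, 0, 0], B returns []
import Mathlib
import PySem

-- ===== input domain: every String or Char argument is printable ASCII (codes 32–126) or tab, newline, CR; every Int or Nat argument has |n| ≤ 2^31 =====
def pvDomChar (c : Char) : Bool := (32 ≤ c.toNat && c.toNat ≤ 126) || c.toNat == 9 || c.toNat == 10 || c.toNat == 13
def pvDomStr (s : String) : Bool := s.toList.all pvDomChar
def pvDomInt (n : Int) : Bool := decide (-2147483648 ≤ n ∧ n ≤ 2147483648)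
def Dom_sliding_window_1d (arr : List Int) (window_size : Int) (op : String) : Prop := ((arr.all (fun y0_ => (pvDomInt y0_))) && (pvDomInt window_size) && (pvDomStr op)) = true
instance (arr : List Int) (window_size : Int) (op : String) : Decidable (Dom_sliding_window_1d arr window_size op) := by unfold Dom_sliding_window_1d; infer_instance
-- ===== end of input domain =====

-- B replaces A's slice-and-recompute per window by incremental single-pass updates
-- (running sum; extremum updated in O(1) unless the leaving element was the extremum;
-- majority via a count dict and a first-match scan instead of Counter + most_common's sort).

-- ===== PORT A =====
-- max(window) / min(window) raise on an empty window and most_common(1)[0] raises there too;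
-- those inputs are excluded by Pre_, so the .getD/.headD defaults below are never reached inside Pre_.
def sliding_window_1d (arr : List Int) (window_size : Int) (op : String) : List Int :=
  (PySem.List.pyRange 0 ((arr.length : Int) - window_size + 1)).foldl (fun results i =>
    let window := PySem.List.slice arr (some i) (some (i + window_size))
    if op == "sum" then results ++ [window.sum]
    else if op == "max" then results ++ [(PySem.List.max? window (fun x => x)).getD 0]
    else if op == "min" then results ++ [(PySem.List.min? window (fun x => x)).getD 0]
    else if op == "majority" then
      -- Counter(window).most_common(1)[0][0]: items stably sorted by count, descending; first item's key
      results ++ [((PySem.List.sorted (PySem.Dict.counter window).items (fun kv => kv.2) true).headD (0, 0)).1]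
    else results) []

-- ===== PORT B =====
-- for i in range(window_size, n): acc += arr[i] - arr[i-window_size]; out.append(acc)
def pvSumLoop (arr : List Int) (w : Int) : Nat → Int → Int → List Int → List Int
  | 0, _, _, out => out
  | k+1, i, acc, out =>
    let acc' := acc + PySem.List.pyGetD arr i 0 - PySem.List.pyGetD arr (i - w) 0
    pvSumLoop arr w k (i + 1) acc' (out ++ [acc'])

-- for i in range(1, n-window_size+1): rescan only if the leaving element was the extremum
def pvExtLoop (arr : List Int) (w : Int) (isMax : Bool) : Nat → Int → Int → List Int → List Int
  | 0, _, _, out => out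
  | k+1, i, cur, out =>
    let entering := PySem.List.pyGetD arr (i + w - 1) 0
    let cur' :=
      if PySem.List.pyGetD arr (i - 1) 0 == cur then
        let win := PySem.List.slice arr (some i) (some (i + w))
        if isMax then (PySem.List.max? win (fun x => x)).getD 0
        else (PySem.List.min? win (fun x => x)).getD 0
      else if isMax then max cur entering else min cur entering
    pvExtLoop arr w isMax k (i + 1) cur' (out ++ [cur'])

-- per window: counts = {}-loop, best = max(counts.values()), then first j with counts[arr[j]] == best
def pvMajLoop (arr : List Int) (w : Int) : Nat → Int → List Int → List Int
  | 0, _, out => out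
  | k+1, i, out =>
    let counts := (PySem.List.pyRange i (i + w)).foldl
      (fun d j => d.insert (PySem.List.pyGetD arr j 0) (d.getD (PySem.List.pyGetD arr j 0) 0 + 1))
      (PySem.Dict.empty : PySem.Dict Int Int)
    let best := (PySem.List.max? counts.values (fun v => v)).getD 0
    let out' :=
      match (PySem.List.pyRange i (i + w)).find?
          (fun j => counts.getD (PySem.List.pyGetD arr j 0) 0 == best) with
      | some j => out ++ [PySem.List.pyGetD arr j 0]
      | none => out
    pvMajLoop arr w k (i + 1) out'

def sliding_window_1d_alt (arr : List Int) (window_size : Int) (op : String) : List Int :=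
  if window_size < 1 || (arr.length : Int) < window_size then []
  else if op == "sum" then
    let acc := (PySem.List.slice arr none (some window_size)).sum
    pvSumLoop arr window_size (arr.length - window_size.toNat) window_size acc [acc]
  else if op == "max" || op == "min" then
    let isMax := op == "max"
    let first := PySem.List.slice arr none (some window_size)
    let cur := if isMax then (PySem.List.max? first (fun x => x)).getD 0
               else (PySem.List.min? first (fun x => x)).getD 0
    pvExtLoop arr window_size isMax (arr.length - window_size.toNat) 1 cur [cur]
  else if op == "majority" then
    pvMajLoop arr window_size (arr.length - window_size.toNat + 1) 0 []
  else []

-- ===== PRECONDITION & SPEC =====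
-- Pre_ excludes non-positive window sizes for the four recognized ops: there max/min/majority
-- raise (empty windows), and for 'sum' the values A returns come from empty or negatively
-- wrapped slices — an unspecified corner where A's zeros and B's [] are equally defensible.
def Pre_sliding_window_1d (arr : List Int) (window_size : Int) (op : String) : Prop :=
  1 ≤ window_size ∨ (op ≠ "sum" ∧ op ≠ "max" ∧ op ≠ "min" ∧ op ≠ "majority")

instance (arr : List Int) (window_size : Int) (op : String) : Decidable (Pre_sliding_window_1d arr window_size op) := by
  unfold Pre_sliding_window_1d; infer_instance

def pvWitness_sliding_window_1d : List Int × Int × String := ([3, 1, 2, 1, 3], 2, "majority")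

def Spec_sliding_window_1d (arr : List Int) (window_size : Int) (op : String) (out : List Int) : Prop := out = sliding_window_1d_alt arr window_size op
instance (arr : List Int) (window_size : Int) (op : String) (out : List Int) : Decidable (Spec_sliding_window_1d arr window_size op out) := by unfold Spec_sliding_window_1d; infer_instance

-- ===== CLAIM (what is proved, stated in full; the proofs are below) =====
def Claim_equal_sliding_window_1d : Prop := ∀ (arr : List Int) (window_size : Int) (op : String), Dom_sliding_window_1d arr window_size op → Pre_sliding_window_1d arr window_size op → Spec_sliding_window_1d arr window_size op (sliding_window_1d arr window_size op)

-- ===== LEMMAS AND PROOFS =====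

lemma pvW_cons (arr : List Int) (a w' : Nat) (ha : a < arr.length) (hw : 1 ≤ w') :
    (arr.drop a).take w' = arr.getD a 0 :: (arr.drop (a + 1)).take (w' - 1) := by
  obtain ⟨m, rfl⟩ : ∃ m, w' = m + 1 := ⟨w' - 1, by omega⟩
  rw [List.drop_eq_getElem_cons ha, List.take_succ_cons]
  rw [List.getD_eq_getElem?_getD, List.getElem?_eq_getElem ha]
  simp

lemma pvW_snoc (arr : List Int) (a w' : Nat) (hw : 1 ≤ w') (h : a + w' < arr.length) :
    (arr.drop (a + 1)).take w' = (arr.drop (a + 1)).take (w' - 1) ++ [arr.getD (a + w') 0] := by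
  obtain ⟨m, rfl⟩ : ∃ m, w' = m + 1 := ⟨w' - 1, by omega⟩
  rw [List.take_add_one]
  have hm : m < (arr.drop (a+1)).length := by simp; omega
  simp [List.getElem?_eq_getElem hm, List.getD_eq_getElem?_getD,
    List.getElem?_eq_getElem (show a + (m+1) < arr.length from h)]
  congr 1
  omega

lemma pvWsum_shift (arr : List Int) (a w' : Nat) (hw : 1 ≤ w') (h : a + w' < arr.length) :
    ((arr.drop (a + 1)).take w').sum
      = ((arr.drop a).take w').sum + arr.getD (a + w') 0 - arr.getD a 0 := by
  rw [pvW_snoc arr a w' hw h, pvW_cons arr a w' (by omega) hw]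
  simp; ring

def pvIsMaxOf (v : Int) (l : List Int) : Prop := v ∈ l ∧ ∀ y ∈ l, y ≤ v
def pvIsMinOf (v : Int) (l : List Int) : Prop := v ∈ l ∧ ∀ y ∈ l, v ≤ y

lemma pvIsMaxOf_unique {u v : Int} {l : List Int} (h1 : pvIsMaxOf u l) (h2 : pvIsMaxOf v l) : u = v :=
  le_antisymm (h2.2 u h1.1) (h1.2 v h2.1)
lemma pvIsMinOf_unique {u v : Int} {l : List Int} (h1 : pvIsMinOf u l) (h2 : pvIsMinOf v l) : u = v :=
  le_antisymm (h1.2 v h2.1) (h2.2 u h1.1)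

lemma pvMax_isMaxOf (l : List Int) (hl : l ≠ []) :
    pvIsMaxOf ((PySem.List.max? l (fun x => x)).getD 0) l := by
  obtain ⟨x, t, rfl⟩ := List.exists_cons_of_ne_nil hl
  rw [PySem.List.max?_id_cons]
  constructor
  · rcases PySem.List.foldl_max_mem t x with h | h
    · simp [h]
    · simp [h]
  · intro y hy
    rcases List.mem_cons.1 hy with rfl | hy
    · exact (PySem.List.le_foldl_max t y).1
    · exact (PySem.List.le_foldl_max t x).2 y hy

lemma pvMin_isMinOf (l : List Int) (hl : l ≠ []) :
    pvIsMinOf ((PySem.List.min? l (fun x => x)).getD 0) l := by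
  obtain ⟨x, t, rfl⟩ := List.exists_cons_of_ne_nil hl
  rw [PySem.List.min?_id_cons]
  constructor
  · rcases PySem.List.foldl_min_mem t x with h | h
    · simp [h]
    · simp [h]
  · intro y hy
    rcases List.mem_cons.1 hy with rfl | hy
    · exact (PySem.List.foldl_min_le t y).1
    · exact (PySem.List.foldl_min_le t x).2 y hy

lemma pvIsMaxOf_step {c x e : Int} {rest : List Int} (h : pvIsMaxOf c (x :: rest)) (hne : c ≠ x) :
    pvIsMaxOf (max c e) (rest ++ [e]) := by
  obtain ⟨hmem, hub⟩ := h
  have hc : c ∈ rest := by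
    rcases List.mem_cons.1 hmem with rfl | h'
    · exact absurd rfl hne
    · exact h'
  constructor
  · rcases max_choice c e with h' | h' <;> simp [h', hc]
  · intro y hy
    rcases List.mem_append.1 hy with hy | hy
    · exact le_trans (hub y (List.mem_cons_of_mem _ hy)) (le_max_left _ _)
    · simp at hy; simp [hy]

lemma pvIsMinOf_step {c x e : Int} {rest : List Int} (h : pvIsMinOf c (x :: rest)) (hne : c ≠ x) :
    pvIsMinOf (min c e) (rest ++ [e]) := by
  obtain ⟨hmem, hub⟩ := h
  have hc : c ∈ rest := by
    rcases List.mem_cons.1 hmem with rfl | h'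
    · exact absurd rfl hne
    · exact h'
  constructor
  · rcases min_choice c e with h' | h' <;> simp [h', hc]
  · intro y hy
    rcases List.mem_append.1 hy with hy | hy
    · exact le_trans (min_le_left _ _) (hub y (List.mem_cons_of_mem _ hy))
    · simp at hy; simp [hy]

lemma pvHead_insertBy {α κ : Type} [LinearOrder κ] (key : α → κ) (x : α) (acc : List α) :
    (PySem.List.insertBy (fun a b => decide (key b < key a)) x acc).head?
      = match acc.head? with
        | none => some x
        | some m => if key m < key x then some x else some m := by
  cases acc with
  | nil => rfl
  | cons y ys =>
    show (if decide (key y < key x) = true then x :: y :: ys else y :: PySem.List.insertBy _ x ys).head? = _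
    by_cases h : key y < key x <;> simp [h]

lemma pvHead_foldl_insertBy {α κ : Type} [LinearOrder κ] (key : α → κ) :
    ∀ (xs : List α) (acc : List α),
      (xs.foldl (fun acc x => PySem.List.insertBy (fun a b => decide (key b < key a)) x acc) acc).head?
        = xs.foldl (fun o x =>
            match o with
            | none => some x
            | some m => if key m < key x then some x else some m) acc.head? := by
  intro xs
  induction xs with
  | nil => intro acc; rfl
  | cons x t ih =>
    intro acc
    simp only [List.foldl_cons]
    rw [ih, pvHead_insertBy]

lemma pvSortedRev_headD {α κ : Type} [LinearOrder κ] (xs : List α) (key : α → κ) (d : α) :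
    (PySem.List.sorted xs key true).headD d = (PySem.List.max? xs key).getD d := by
  rw [List.headD_eq_head?_getD, PySem.List.sorted_rev_eq_foldl_insertBy, pvHead_foldl_insertBy]
  rfl

lemma pvMax?_eq_find?_aux {α κ : Type} [LinearOrder κ] (key : α → κ) :
    ∀ (t : List α) (m : α), (∀ y ∈ t, key y ≤ key m) →
      t.foldl (fun o x =>
          match o with
          | none => some x
          | some m => if key m < key x then some x else some m) (some m) = some m := by
  intro t
  induction t with
  | nil => intro m _; rfl
  | cons z t ih =>
    intro m h
    simp only [List.foldl_cons]
    have hz : ¬ key m < key z := not_lt.2 (h z (by simp))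
    simp only [hz, if_false]
    exact ih m (fun y hy => h y (by simp [hy]))

lemma pvMax?_eq_find?_aux2 {α κ : Type} [LinearOrder κ] (key : α → κ) (M : κ) :
    ∀ (t : List α) (x : α), key x < M → (∃ y ∈ t, key y = M) → (∀ y ∈ t, key y ≤ M) →
      t.foldl (fun o x =>
          match o with
          | none => some x
          | some m => if key m < key x then some x else some m) (some x)
        = t.find? (fun y => decide (key y = M)) := by
  intro t
  induction t with
  | nil =>
    intro x _ hex _
    simp at hex
  | cons z t ih =>
    intro x hx hex hub
    simp only [List.foldl_cons, List.find?_cons]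
    by_cases hz : key z = M
    · simp only [hz, decide_true]
      have : key x < key z := by rw [hz]; exact hx
      rw [if_pos hx]
      exact pvMax?_eq_find?_aux key t z (fun y hy => hz ▸ hub y (by simp [hy]))
    · have hzM : key z < M := lt_of_le_of_ne (hub z (by simp)) hz
      have hex' : ∃ y ∈ t, key y = M := by
        rcases hex with ⟨y, hy, hyM⟩
        rcases List.mem_cons.1 hy with rfl | hy'
        · exact absurd hyM hz
        · exact ⟨y, hy', hyM⟩
      have hub' : ∀ y ∈ t, key y ≤ M := fun y hy => hub y (by simp [hy])
      simp only [hz, decide_false]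
      by_cases hxz : key x < key z
      · rw [if_pos hxz]
        exact ih z hzM hex' hub'
      · rw [if_neg hxz]
        exact ih x hx hex' hub'

lemma pvMax?_eq_find? {α κ : Type} [LinearOrder κ] (key : α → κ) (M : κ)
    (ys : List α) (hub : ∀ y ∈ ys, key y ≤ M) (hex : ∃ y ∈ ys, key y = M) :
    PySem.List.max? ys key = ys.find? (fun y => decide (key y = M)) := by
  cases ys with
  | nil => simp at hex
  | cons x t =>
    show (x :: t).foldl _ none = _
    simp only [List.foldl_cons, List.find?_cons]
    by_cases hx : key x = M
    · simp only [hx, decide_true]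
      exact pvMax?_eq_find?_aux key t x (fun y hy => hx ▸ hub y (by simp [hy]))
    · have hxM : key x < M := lt_of_le_of_ne (hub x (by simp)) hx
      have hex' : ∃ y ∈ t, key y = M := by
        rcases hex with ⟨y, hy, hyM⟩
        rcases List.mem_cons.1 hy with rfl | hy'
        · exact absurd hyM hx
        · exact ⟨y, hy', hyM⟩
      simp only [hx, decide_false]
      exact pvMax?_eq_find?_aux2 key M t x hxM hex' (fun y hy => hub y (by simp [hy]))

lemma pvFind?_foldl_add (p : Int → Bool) :
    ∀ (l acc : List Int),
      ((l.foldl PySem.Set.add acc).find? p)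
        = match acc.find? p with
          | some a => some a
          | none => l.find? p := by
  intro l
  induction l with
  | nil =>
    intro acc
    cases h : acc.find? p <;> simp [h]
  | cons x t ih =>
    intro acc
    simp only [List.foldl_cons]
    rw [ih]
    unfold PySem.Set.add
    by_cases hmem : PySem.Set.contains acc x = true
    · simp only [hmem, if_pos]
      cases h : acc.find? p with
      | some a => rfl
      | none =>
        have hx : ¬ p x = true := by
          have := List.find?_eq_none.1 h x
          unfold PySem.Set.contains at hmem
          exact this (by simpa using hmem)
        simp [hx]
    · simp only [hmem, Bool.false_eq_true, if_false]
      rw [List.find?_append]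
      cases h : acc.find? p with
      | some a => rfl
      | none =>
        simp only [Option.none_or]
        by_cases hx : p x = true
        · simp [hx]
        · simp [hx]

lemma pvFind?_ofList (p : Int → Bool) (l : List Int) :
    (PySem.Set.ofList l).find? p = l.find? p := by
  show ((l.foldl PySem.Set.add PySem.Set.empty).find? p) = _
  rw [pvFind?_foldl_add]
  rfl

lemma pvFoldl_pyRange_window {β : Type} (arr : List Int) (f : β → Int → β) :
    ∀ (n a : Nat) (init : β), a + n ≤ arr.length →
      (PySem.List.pyRange (a : Int) ((a : Int) + (n : Int))).foldl
          (fun acc j => f acc (PySem.List.pyGetD arr j 0)) init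
        = ((arr.drop a).take n).foldl f init := by
  intro n
  induction n with
  | zero =>
    intro a init _
    have : PySem.List.pyRange (a : Int) ((a : Int) + (0 : Nat)) = [] := by
      have : ((a : Int) + ((0 : Nat) : Int)) = (a : Int) := by push_cast; ring
      rw [this]
      simp [PySem.List.pyRange]
    rw [this]; simp
  | succ m ih =>
    intro a init h
    rw [PySem.List.pyRange_one_cons (by push_cast; omega)]
    simp only [List.foldl_cons]
    have h1 : ((a : Int) + 1) = ((a + 1 : Nat) : Int) := by push_cast; ring
    have h2 : ((a : Int) + ((m + 1 : Nat) : Int)) = ((a + 1 : Nat) : Int) + ((m : Nat) : Int) := by push_cast; ring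
    rw [h2, h1, ih (a + 1) _ (by omega)]
    rw [pvW_cons arr a (m + 1) (by omega) (by omega)]
    simp [PySem.List.pyGetD_natCast]

lemma pvFind?_pyRange_window (arr : List Int) (p : Int → Bool) :
    ∀ (n a : Nat), a + n ≤ arr.length →
      ((PySem.List.pyRange (a : Int) ((a : Int) + (n : Int))).find?
          (fun j => p (PySem.List.pyGetD arr j 0))).map (fun j => PySem.List.pyGetD arr j 0)
        = ((arr.drop a).take n).find? p := by
  intro n
  induction n with
  | zero =>
    intro a _
    have : PySem.List.pyRange (a : Int) ((a : Int) + (0 : Nat)) = [] := by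
      have : ((a : Int) + ((0 : Nat) : Int)) = (a : Int) := by push_cast; ring
      rw [this]
      simp [PySem.List.pyRange]
    rw [this]; simp
  | succ m ih =>
    intro a h
    rw [PySem.List.pyRange_one_cons (by push_cast; omega)]
    rw [pvW_cons arr a (m + 1) (by omega) (by omega)]
    have hpg : PySem.List.pyGetD arr ((a : Nat) : Int) 0 = arr.getD a 0 :=
      PySem.List.pyGetD_natCast arr a 0
    simp only [List.find?_cons, hpg]
    by_cases hp : p (arr.getD a 0) = true
    · simp only [hp, Option.map_some]
      rw [hpg]
    · simp only [hp]
      have h1 : ((a : Int) + 1) = ((a + 1 : Nat) : Int) := by push_cast; ring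
      have h2 : ((a : Int) + ((m + 1 : Nat) : Int)) = ((a + 1 : Nat) : Int) + ((m : Nat) : Int) := by
        push_cast; ring
      rw [h2, h1, ih (a + 1) (by omega)]
      norm_num

lemma pvMaj_crux (l : List Int) (hl : l ≠ []) :
    ((PySem.List.sorted (PySem.Dict.counter l).items (fun kv => kv.2) true).headD (0, 0)).1
      = (l.find? (fun x =>
            ((l.count x : Int) == (PySem.List.max? (PySem.Dict.counter l).values (fun v => v)).getD 0))).getD 0 := by
  set best := (PySem.List.max? (PySem.Dict.counter l).values (fun v => v)).getD 0 with hbest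
  have hitems : (PySem.Dict.counter l).items
      = (PySem.Set.ofList l).map (fun k => (k, (l.count k : Int))) := PySem.Dict.items_counter l
  have hvals : (PySem.Dict.counter l).values
      = (PySem.Set.ofList l).map (fun k => (l.count k : Int)) := by
    show ((PySem.Dict.counter l).items).map (fun x => x.2) = _
    rw [hitems, List.map_map]
    rfl
  have hSne : PySem.Set.ofList l ≠ [] := by
    obtain ⟨x, t, rfl⟩ := List.exists_cons_of_ne_nil hl
    intro hS
    have : x ∈ PySem.Set.ofList (x :: t) := (PySem.Set.mem_ofList _ x).2 (by simp)
    rw [hS] at this; simp at this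
  have hvne : (PySem.Dict.counter l).values ≠ [] := by
    rw [hvals]; simpa using hSne
  have hbm := pvMax_isMaxOf _ hvne
  rw [← hbest] at hbm
  obtain ⟨hmem, hub⟩ := hbm
  -- upper bound and witness for the items list
  have hub' : ∀ kv ∈ (PySem.Dict.counter l).items, kv.2 ≤ best := by
    intro kv hkv
    rw [hitems] at hkv
    obtain ⟨k, hk, rfl⟩ := List.mem_map.1 hkv
    exact hub _ (by rw [hvals]; exact List.mem_map.2 ⟨k, hk, rfl⟩)
  have hex' : ∃ kv ∈ (PySem.Dict.counter l).items, kv.2 = best := by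
    rw [hvals] at hmem
    obtain ⟨k, hk, hkb⟩ := List.mem_map.1 hmem
    exact ⟨(k, (l.count k : Int)), by rw [hitems]; exact List.mem_map.2 ⟨k, hk, rfl⟩, hkb⟩
  rw [pvSortedRev_headD, pvMax?_eq_find? (fun kv : Int × Int => kv.2) best _ hub' hex']
  rw [hitems, List.find?_map, pvFind?_ofList]
  have hpred : (fun x => ((l.count x : Int) == best))
      = ((fun kv : Int × Int => decide (kv.2 = best)) ∘ (fun k => (k, (l.count k : Int)))) := by
    funext x
    by_cases h : (l.count x : Int) = best <;> simp [h]
  rw [← hpred]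
  -- the find? is some: a witness exists in l
  have hex2 : ∃ x ∈ l, ((l.count x : Int) == best) = true := by
    obtain ⟨kv, hkv, hkvb⟩ := hex'
    rw [hitems] at hkv
    obtain ⟨k, hk, rfl⟩ := List.mem_map.1 hkv
    exact ⟨k, (PySem.Set.mem_ofList l k).1 hk, by simp_all⟩
  obtain ⟨x0, hfind⟩ := Option.isSome_iff_exists.1 (List.find?_isSome.2 hex2)
  rw [hfind]
  rfl

lemma pvSumLoop_eq (arr : List Int) (w' : Nat) (hw : 1 ≤ w') :
    ∀ (k s : Nat) (out : List Int), w' ≤ s → s + k ≤ arr.length →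
      pvSumLoop arr (w' : Int) k (s : Int) (((arr.drop (s - w')).take w').sum) out
        = out ++ (List.range k).map (fun j => ((arr.drop (s - w' + 1 + j)).take w').sum) := by
  intro k
  induction k with
  | zero => intro s out _ _; simp [pvSumLoop]
  | succ k ih =>
    intro s out hws hlen
    simp only [pvSumLoop]
    have hc1 : PySem.List.pyGetD arr ((s : Nat) : Int) 0 = arr.getD s 0 :=
      PySem.List.pyGetD_natCast arr s 0
    have hc2 : ((s : Int) - (w' : Int)) = ((s - w' : Nat) : Int) := by omega
    have hc3 : ((s : Int) + 1) = ((s + 1 : Nat) : Int) := by omega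
    have hshift : ((arr.drop (s - w')).take w').sum + arr.getD s 0 - arr.getD (s - w') 0
        = ((arr.drop ((s + 1) - w')).take w').sum := by
      have h1 := pvWsum_shift arr (s - w') w' hw (by omega)
      have e1 : s - w' + w' = s := by omega
      have e2 : s - w' + 1 = (s + 1) - w' := by omega
      rw [e1, e2] at h1
      omega
    rw [hc1, hc2, PySem.List.pyGetD_natCast arr (s - w') 0, hc3, hshift,
      ih (s + 1) _ (by omega) (by omega)]
    rw [List.range_succ_eq_map, List.map_cons, List.map_map]
    have e3 : s - w' + 1 + 0 = (s + 1) - w' := by omega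
    simp only [List.append_assoc, List.singleton_append, e3]
    congr 2
    apply List.map_congr_left
    intro j _
    simp only [Function.comp]
    have e : s + 1 - w' + 1 + j = s + 1 - w' + j.succ := by omega
    rw [e]

lemma pvW_ne_nil (arr : List Int) (a w' : Nat) (hw : 1 ≤ w') (ha : a < arr.length) :
    (arr.drop a).take w' ≠ [] := by
  apply List.ne_nil_of_length_pos
  simp
  omega

lemma pvExt_step (arr : List Int) (w' : Nat) (isMax : Bool) (a : Nat) (hw : 1 ≤ w')
    (h : a + 1 + w' ≤ arr.length) (cur : Int)
    (hcur : cur = (if isMax then (PySem.List.max? ((arr.drop a).take w') (fun x => x)).getD 0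
                   else (PySem.List.min? ((arr.drop a).take w') (fun x => x)).getD 0))
    (hne : arr.getD a 0 ≠ cur) :
    (if isMax then max cur (arr.getD (a + w') 0) else min cur (arr.getD (a + w') 0))
      = (if isMax then (PySem.List.max? ((arr.drop (a + 1)).take w') (fun x => x)).getD 0
         else (PySem.List.min? ((arr.drop (a + 1)).take w') (fun x => x)).getD 0) := by
  have hWa := pvW_cons arr a w' (by omega) hw
  have hWs := pvW_snoc arr a w' hw (by omega)
  cases isMax with
  | true =>
    simp only [if_pos] at hcur ⊢
    have hchar := pvMax_isMaxOf _ (pvW_ne_nil arr a w' hw (by omega))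
    rw [← hcur] at hchar
    rw [hWa] at hchar
    have hstep := pvIsMaxOf_step (e := arr.getD (a + w') 0) hchar (fun hc => hne hc.symm)
    rw [← hWs] at hstep
    have hchar' := pvMax_isMaxOf _ (pvW_ne_nil arr (a + 1) w' hw (by omega))
    exact pvIsMaxOf_unique hstep hchar'
  | false =>
    simp only [Bool.false_eq_true, if_false] at hcur ⊢
    have hchar := pvMin_isMinOf _ (pvW_ne_nil arr a w' hw (by omega))
    rw [← hcur] at hchar
    rw [hWa] at hchar
    have hstep := pvIsMinOf_step (e := arr.getD (a + w') 0) hchar (fun hc => hne hc.symm)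
    rw [← hWs] at hstep
    have hchar' := pvMin_isMinOf _ (pvW_ne_nil arr (a + 1) w' hw (by omega))
    exact pvIsMinOf_unique hstep hchar'

lemma pvExtLoop_eq (arr : List Int) (w' : Nat) (hw : 1 ≤ w') (isMax : Bool) :
    ∀ (k s : Nat) (out : List Int) (cur : Int), 1 ≤ s → s + k + w' ≤ arr.length + 1 →
      cur = (if isMax then (PySem.List.max? ((arr.drop (s - 1)).take w') (fun x => x)).getD 0
             else (PySem.List.min? ((arr.drop (s - 1)).take w') (fun x => x)).getD 0) →
      pvExtLoop arr (w' : Int) isMax k (s : Int) cur out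
        = out ++ (List.range k).map (fun j =>
            if isMax then (PySem.List.max? ((arr.drop (s + j)).take w') (fun x => x)).getD 0
            else (PySem.List.min? ((arr.drop (s + j)).take w') (fun x => x)).getD 0) := by
  intro k
  induction k with
  | zero => intro s out cur _ _ _; simp [pvExtLoop]
  | succ k ih =>
    intro s out cur hs hlen hcur
    simp only [pvExtLoop]
    have hc1 : ((s : Int) + (w' : Int) - 1) = ((s + w' - 1 : Nat) : Int) := by omega
    have hc2 : ((s : Int) - 1) = ((s - 1 : Nat) : Int) := by omega
    have hc3 : ((s : Int) + 1) = ((s + 1 : Nat) : Int) := by omega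
    have hslice : PySem.List.slice arr (some (s : Int)) (some ((s : Int) + (w' : Int)))
        = (arr.drop s).take w' := PySem.List.slice_natCast_add arr s w'
    rw [hc1, hc2, PySem.List.pyGetD_natCast arr (s + w' - 1) 0,
      PySem.List.pyGetD_natCast arr (s - 1) 0, hslice]
    set cur' := (if (arr.getD (s - 1) 0 == cur) = true then
        if isMax then (PySem.List.max? ((arr.drop s).take w') (fun x => x)).getD 0
        else (PySem.List.min? ((arr.drop s).take w') (fun x => x)).getD 0
      else if isMax then max cur (arr.getD (s + w' - 1) 0)
        else min cur (arr.getD (s + w' - 1) 0)) with hcur'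
    have hcur'W : cur' = (if isMax then (PySem.List.max? ((arr.drop s).take w') (fun x => x)).getD 0
        else (PySem.List.min? ((arr.drop s).take w') (fun x => x)).getD 0) := by
      by_cases hb : arr.getD (s - 1) 0 = cur
      · rw [hcur', if_pos (by rw [hb]; exact beq_self_eq_true cur)]
      · rw [hcur', if_neg (fun hc => hb (eq_of_beq hc))]
        have := pvExt_step arr w' isMax (s - 1) hw (by omega) cur
          (by rw [hcur]) hb
        have e1 : s - 1 + 1 = s := by omega
        have e2 : s - 1 + w' = s + w' - 1 := by omega
        rw [e1, e2] at this
        exact this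
    rw [hc3, ih (s + 1) (out ++ [cur']) cur' (by omega) (by omega)
      (by simp only [Nat.add_sub_cancel]; exact hcur'W)]
    rw [List.range_succ_eq_map, List.map_cons, List.map_map]
    simp only [List.append_assoc, List.singleton_append, Nat.add_zero]
    congr 1
    congr 1
    apply List.map_congr_left
    intro j _
    simp only [Function.comp]
    have e : s + 1 + j = s + j.succ := by omega
    rw [e]

lemma pvBest_witness (l : List Int) (hl : l ≠ []) :
    ∃ x ∈ l, ((l.count x : Int)
      == (PySem.List.max? (PySem.Dict.counter l).values (fun v => v)).getD 0) = true := by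
  have hitems : (PySem.Dict.counter l).items
      = (PySem.Set.ofList l).map (fun k => (k, (l.count k : Int))) := PySem.Dict.items_counter l
  have hvals : (PySem.Dict.counter l).values
      = (PySem.Set.ofList l).map (fun k => (l.count k : Int)) := by
    show ((PySem.Dict.counter l).items).map (fun x => x.2) = _
    rw [hitems, List.map_map]; rfl
  have hSne : PySem.Set.ofList l ≠ [] := by
    obtain ⟨x, t, rfl⟩ := List.exists_cons_of_ne_nil hl
    intro hS
    have : x ∈ PySem.Set.ofList (x :: t) := (PySem.Set.mem_ofList _ x).2 (by simp)
    rw [hS] at this; simp at this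
  have hvne : (PySem.Dict.counter l).values ≠ [] := by rw [hvals]; simpa using hSne
  have hmem := (pvMax_isMaxOf _ hvne).1
  rw [hvals] at hmem
  obtain ⟨k, hk, hkb⟩ := List.mem_map.1 hmem
  exact ⟨k, (PySem.Set.mem_ofList l k).1 hk, by rw [hvals, hkb]; simp⟩

lemma pvMajLoop_eq (arr : List Int) (w' : Nat) (hw : 1 ≤ w') :
    ∀ (k s : Nat) (out : List Int), s + k + w' ≤ arr.length + 1 →
      pvMajLoop arr (w' : Int) k (s : Int) out
        = out ++ (List.range k).map (fun i =>
            ((PySem.List.sorted (PySem.Dict.counter ((arr.drop (s + i)).take w')).items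
                (fun kv => kv.2) true).headD (0, 0)).1) := by
  intro k
  induction k with
  | zero => intro s out _; simp [pvMajLoop]
  | succ k ih =>
    intro s out hlen
    simp only [pvMajLoop]
    set l := (arr.drop s).take w' with hldef
    have hlne : l ≠ [] := pvW_ne_nil arr s w' hw (by omega)
    have hcounts : (PySem.List.pyRange (s : Int) ((s : Int) + (w' : Int))).foldl
        (fun d j => d.insert (PySem.List.pyGetD arr j 0) (d.getD (PySem.List.pyGetD arr j 0) 0 + 1))
        PySem.Dict.empty = PySem.Dict.counter l := by
      have h1 := pvFoldl_pyRange_window (β := PySem.Dict Int Int) arr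
        (fun d x => d.insert x (d.getD x 0 + 1)) w' s PySem.Dict.empty (by omega)
      rw [h1]
      exact PySem.Dict.foldl_insert_getD_add_one_eq_counter l
    rw [hcounts]
    set best := (PySem.List.max? (PySem.Dict.counter l).values (fun v => v)).getD 0 with hbest
    have hpred : (fun j => (PySem.Dict.counter l).getD (PySem.List.pyGetD arr j 0) 0 == best)
        = (fun j => ((fun x => ((l.count x : Int) == best)) (PySem.List.pyGetD arr j 0))) := by
      funext j
      rw [PySem.Dict.getD_counter]
    rw [hpred]
    obtain ⟨x0, hx0l, hx0p⟩ := pvBest_witness l hlne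
    have hfind : l.find? (fun x => ((l.count x : Int) == best)) ≠ none := by
      intro hn
      exact absurd hx0p (by simpa using List.find?_eq_none.1 hn x0 hx0l)
    obtain ⟨y0, hy0⟩ := Option.ne_none_iff_exists'.1 hfind
    have hmap := pvFind?_pyRange_window arr (fun x => ((l.count x : Int) == best)) w' s (by omega)
    rw [hldef] at hy0
    rw [hy0] at hmap
    obtain ⟨j0, hj0, hj0v⟩ := Option.map_eq_some_iff.1 hmap
    rw [hj0]
    show pvMajLoop arr (w' : Int) k ((s : Int) + 1) (out ++ [PySem.List.pyGetD arr j0 0]) = _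
    have hstep : (out ++ [PySem.List.pyGetD arr j0 0])
        = out ++ [((PySem.List.sorted (PySem.Dict.counter l).items (fun kv => kv.2) true).headD (0, 0)).1] := by
      rw [pvMaj_crux l hlne, ← hbest, hy0, hj0v]
      rfl
    rw [hstep]
    have hc3 : ((s : Int) + 1) = ((s + 1 : Nat) : Int) := by omega
    rw [hc3, ih (s + 1) _ (by omega)]
    rw [List.range_succ_eq_map, List.map_cons, List.map_map]
    simp only [List.append_assoc, List.singleton_append, Nat.add_zero]
    congr 1
    congr 1
    apply List.map_congr_left
    intro j _
    simp only [Function.comp]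
    have e : s + 1 + j = s + j.succ := by omega
    rw [e]

lemma pvA_eq_map (arr : List Int) (w' : Nat) (hlen : w' ≤ arr.length) (op : String)
    (g : List Int → Int)
    (hop : ∀ (res : List Int) (window : List Int),
      (if op == "sum" then res ++ [window.sum]
       else if op == "max" then res ++ [(PySem.List.max? window (fun x => x)).getD 0]
       else if op == "min" then res ++ [(PySem.List.min? window (fun x => x)).getD 0]
       else if op == "majority" then
         res ++ [((PySem.List.sorted (PySem.Dict.counter window).items (fun kv => kv.2) true).headD (0, 0)).1]
       else res) = res ++ [g window]) :
    sliding_window_1d arr (w' : Int) op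
      = (List.range (arr.length - w' + 1)).map (fun i => g ((arr.drop i).take w')) := by
  unfold sliding_window_1d
  have hb : ((arr.length : Int) - (w' : Int) + 1) = ((arr.length - w' + 1 : Nat) : Int) := by omega
  rw [hb, PySem.List.pyRange_zero_natCast, List.foldl_map]
  have hfun : ∀ (res : List Int) (k : Nat), k ∈ List.range (arr.length - w' + 1) →
      (fun (results : List Int) (i : Int) =>
        let window := PySem.List.slice arr (some i) (some (i + (w' : Int)))
        if op == "sum" then results ++ [window.sum]
        else if op == "max" then results ++ [(PySem.List.max? window (fun x => x)).getD 0]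
        else if op == "min" then results ++ [(PySem.List.min? window (fun x => x)).getD 0]
        else if op == "majority" then
          results ++ [((PySem.List.sorted (PySem.Dict.counter window).items (fun kv => kv.2) true).headD (0, 0)).1]
        else results) res ((k : Nat) : Int)
      = res ++ [g ((arr.drop k).take w')] := by
    intro res k _
    show (if op == "sum" then _ else _) = _
    rw [PySem.List.slice_natCast_add arr k w'] at *
    exact hop res _
  calc (List.range (arr.length - w' + 1)).foldl (fun x y => _) []
      = (List.range (arr.length - w' + 1)).foldl (fun res k => res ++ [g ((arr.drop k).take w')]) [] := by
        apply PySem.List.foldl_congr_mem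
        intro acc x hx
        exact hfun acc x hx
    _ = [] ++ (List.range (arr.length - w' + 1)).map (fun i => g ((arr.drop i).take w')) :=
        PySem.List.foldl_append_singleton_eq_map _ _ _
    _ = _ := by simp

-- ===== VERDICT (by name: the statement is the Claim_ definition above) =====
theorem sliding_window_1d_spec : Claim_equal_sliding_window_1d := by
  intro arr w op _ hpre
  unfold Spec_sliding_window_1d
  by_cases h4 : op = "sum" ∨ op = "max" ∨ op = "min" ∨ op = "majority"
  case neg =>
    have h1 : op ≠ "sum" := fun h => h4 (Or.inl h)
    have h2 : op ≠ "max" := fun h => h4 (Or.inr (Or.inl h))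
    have h3 : op ≠ "min" := fun h => h4 (Or.inr (Or.inr (Or.inl h)))
    have hm : op ≠ "majority" := fun h => h4 (Or.inr (Or.inr (Or.inr h)))
    have hA : sliding_window_1d arr w op = [] := by
      unfold sliding_window_1d
      simp [h1, h2, h3, hm]
    have hB : sliding_window_1d_alt arr w op = [] := by
      unfold sliding_window_1d_alt
      simp [h1, h2, h3, hm]
    rw [hA, hB]
  case pos =>
    have hw1 : 1 ≤ w := by
      rcases hpre with h | h
      · exact h
      · rcases h4 with h' | h' | h' | h' <;> exact absurd h' (by tauto)
    obtain ⟨w', rfl⟩ : ∃ w' : Nat, w = (w' : Int) := ⟨w.toNat, by omega⟩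
    have hw : 1 ≤ w' := by omega
    by_cases hlen : w' ≤ arr.length
    case neg =>
      have hA : sliding_window_1d arr (w' : Int) op = [] := by
        unfold sliding_window_1d
        have : PySem.List.pyRange 0 ((arr.length : Int) - (w' : Int) + 1) = [] := by
          simp [PySem.List.pyRange]; omega
        rw [this]
        rfl
      have hB : sliding_window_1d_alt arr (w' : Int) op = [] := by
        unfold sliding_window_1d_alt
        have : ((w' : Int) < 1 || (arr.length : Int) < (w' : Int)) = true := by
          simp; omega
        rw [this]
        rfl
      rw [hA, hB]
    case pos =>
      have hm1 : arr.length - w' + 1 = (arr.length - w') + 1 := by omega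
      rcases h4 with rfl | rfl | rfl | rfl
      · -- op = "sum"
        rw [pvA_eq_map arr w' hlen "sum" (fun window => window.sum) (by intro res window; simp)]
        unfold sliding_window_1d_alt
        split_ifs with hg hs
        · exfalso; simp at hg; omega
        · rw [PySem.List.slice_to_natCast arr w', Int.toNat_natCast]
          have hstart := pvSumLoop_eq arr w' hw (arr.length - w') w'
            [((arr.drop (w' - w')).take w').sum] (le_refl w') (by omega)
          rw [Nat.sub_self, List.drop_zero] at hstart
          rw [hstart, hm1, List.range_succ_eq_map, List.map_cons, List.map_map]
          simp only [List.singleton_append, List.drop_zero]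
          congr 1
          apply List.map_congr_left
          intro j _
          simp only [Function.comp]
          have e : (0 : Nat) + 1 + j = j.succ := by omega
          rw [e]
        all_goals exact absurd (by decide : (("sum" : String) == "sum") = true) (by assumption)
      · -- op = "max"
        rw [pvA_eq_map arr w' hlen "max"
          (fun window => (PySem.List.max? window (fun x => x)).getD 0) (by intro res window; simp)]
        unfold sliding_window_1d_alt
        split_ifs with hg hs hmm
        · exfalso; simp at hg; omega
        · exact absurd hs (by decide)
        · rw [PySem.List.slice_to_natCast arr w', Int.toNat_natCast]
          have hstart := pvExtLoop_eq arr w' hw (("max" : String) == "max") (arr.length - w') 1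
            [(if (("max" : String) == "max") then
                (PySem.List.max? ((arr.drop (1 - 1)).take w') (fun x => x)).getD 0
              else (PySem.List.min? ((arr.drop (1 - 1)).take w') (fun x => x)).getD 0)]
            (if (("max" : String) == "max") then
                (PySem.List.max? ((arr.drop (1 - 1)).take w') (fun x => x)).getD 0
              else (PySem.List.min? ((arr.drop (1 - 1)).take w') (fun x => x)).getD 0)
            (le_refl 1) (by omega) rfl
          rw [Nat.sub_self, List.drop_zero, Nat.cast_one] at hstart
          rw [show (("max" : String) == "max") = true from by decide] at hstart ⊢
          simp only [if_true] at hstart ⊢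
          rw [hstart, hm1, List.range_succ_eq_map, List.map_cons, List.map_map]
          simp only [List.singleton_append, List.drop_zero]
          congr 1
          apply List.map_congr_left
          intro j _
          simp only [Function.comp]
          have e : (1 : Nat) + j = j.succ := by omega
          rw [e]
        all_goals exact absurd (by decide : (("max" : String) == "max" || ("max" : String) == "min") = true) (by assumption)
      · -- op = "min"
        rw [pvA_eq_map arr w' hlen "min"
          (fun window => (PySem.List.min? window (fun x => x)).getD 0) (by intro res window; simp)]
        unfold sliding_window_1d_alt
        split_ifs with hg hs hmm
        · exfalso; simp at hg; omega
        · exact absurd hs (by decide)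
        · rw [PySem.List.slice_to_natCast arr w', Int.toNat_natCast]
          have hstart := pvExtLoop_eq arr w' hw (("min" : String) == "max") (arr.length - w') 1
            [(if (("min" : String) == "max") then
                (PySem.List.max? ((arr.drop (1 - 1)).take w') (fun x => x)).getD 0
              else (PySem.List.min? ((arr.drop (1 - 1)).take w') (fun x => x)).getD 0)]
            (if (("min" : String) == "max") then
                (PySem.List.max? ((arr.drop (1 - 1)).take w') (fun x => x)).getD 0
              else (PySem.List.min? ((arr.drop (1 - 1)).take w') (fun x => x)).getD 0)
            (le_refl 1) (by omega) rfl
          rw [Nat.sub_self, List.drop_zero, Nat.cast_one] at hstart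
          rw [show (("min" : String) == "max") = false from by decide] at hstart ⊢
          simp only [Bool.false_eq_true, if_false] at hstart ⊢
          rw [hstart, hm1, List.range_succ_eq_map, List.map_cons, List.map_map]
          simp only [List.singleton_append, List.drop_zero]
          congr 1
          apply List.map_congr_left
          intro j _
          simp only [Function.comp]
          have e : (1 : Nat) + j = j.succ := by omega
          rw [e]
        all_goals exact absurd (by decide : (("min" : String) == "max" || ("min" : String) == "min") = true) (by assumption)
      · -- op = "majority"
        rw [pvA_eq_map arr w' hlen "majority"
          (fun window =>
            ((PySem.List.sorted (PySem.Dict.counter window).items (fun kv => kv.2) true).headD (0, 0)).1)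
          (by intro res window; simp)]
        unfold sliding_window_1d_alt
        split_ifs with hg hs hmm hmaj
        · exfalso; simp at hg; omega
        · exact absurd hs (by decide)
        · exact absurd hmm (by decide)
        · rw [Int.toNat_natCast]
          have h0 : ((0 : Nat) : Int) = (0 : Int) := rfl
          rw [← h0, pvMajLoop_eq arr w' hw (arr.length - w' + 1) 0 [] (by omega)]
          simp only [List.nil_append, Nat.zero_add]
          norm_num
        · exact absurd (by decide : (("majority" : String) == "majority") = true) hmaj
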